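-- pv_equiv track=rewrite | github.com/FaniriniainaLucia/ProgRes | nat_gateway/core/nat_config.py | validate_interface_name
-- ===== SOURCE A (Python) =====
-- def validate_interface_name(interface: str) -> bool:
--     """Valide le nom d'une interface réseau."""
--     if not interface or not isinstance(interface, str):
--         return False
--
--     # Vérifications basiques
--     if len(interface) > 15:  # Limite Linux pour les noms d'interface
--         return False
--
--     # Caractères autorisés
--     allowed_chars = set('abcdefghijklmnopqrstuvwxyzABCDEFGHIJKLMNOPQRSTUVWXYZ0123456789-_.')
--     if not all(c in allowed_chars for c in interface):
--         return False
--
--     return True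
-- ===== SOURCE B (Python) =====
-- import re
--
-- _IFNAME_RE = re.compile(r'[A-Za-z0-9._-]{1,15}\Z')
--
-- def validate_interface_name(interface: str) -> bool:
--     """Valide le nom d'une interface réseau."""
--     if not isinstance(interface, str):
--         return False
--     return _IFNAME_RE.fullmatch(interface) is not None
-- ===== Notes on version B (the rewrite author's own statement) =====
-- stated objective: idiomatic
-- what changed: Replaces the explicit empty/length guards and the per-character set-membership loop with a single precompiled regex fullmatch of [A-Za-z0-9._-]{1,15}, which folds nonemptiness, the 15-char limit and the character class into one pattern pass.
import Mathlib
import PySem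

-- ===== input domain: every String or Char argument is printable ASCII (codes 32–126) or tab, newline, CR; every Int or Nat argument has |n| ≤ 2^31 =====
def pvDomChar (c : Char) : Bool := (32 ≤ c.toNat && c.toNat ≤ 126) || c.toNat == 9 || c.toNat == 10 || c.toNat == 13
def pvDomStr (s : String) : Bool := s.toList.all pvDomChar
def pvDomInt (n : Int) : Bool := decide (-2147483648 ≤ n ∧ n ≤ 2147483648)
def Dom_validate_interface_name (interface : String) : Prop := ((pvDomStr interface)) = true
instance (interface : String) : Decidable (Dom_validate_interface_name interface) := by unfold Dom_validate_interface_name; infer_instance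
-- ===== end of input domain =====

-- B replaces A's explicit guards and set-membership loop with a single regex-style
-- full match of [A-Za-z0-9._-]{1,15} (objective: idiomatic). Return value only; no mutation.

-- ===== PORT A =====
-- A's allowed_chars = set('abc…-_.')
def pvAllowedChars : PySem.Set Char :=
  PySem.Set.ofList "abcdefghijklmnopqrstuvwxyzABCDEFGHIJKLMNOPQRSTUVWXYZ0123456789-_.".toList

def validate_interface_name (interface : String) : Bool :=
  -- `not interface` (isinstance is always true at type String)
  if interface.toList = [] then false
  -- `len(interface) > 15`
  else if 15 < PySem.Str.len interface then false
  -- `not all(c in allowed_chars for c in interface)`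
  else if !(interface.toList.all (fun c => PySem.Set.contains pvAllowedChars c)) then false
  else true

-- ===== PORT B =====
-- Hand port of re.fullmatch(r'[A-Za-z0-9._-]{1,15}', s): the character class …
def pvIsClassChar (c : Char) : Bool :=
  ('A' ≤ c && c ≤ 'Z') || ('a' ≤ c && c ≤ 'z') || ('0' ≤ c && c ≤ '9')
    || c == '.' || c == '_' || c == '-'

-- … and the bounded-repetition matcher {1,15}: consume class characters with a counter,
-- accepting exactly when the whole input is consumed after 1–15 steps (exact for this
-- pattern: the class is one character wide, so matching is deterministic, no backtracking).
def pvMatchRun : List Char → Nat → Bool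
  | [], n => decide (1 ≤ n)
  | c :: cs, n => decide (n < 15) && pvIsClassChar c && pvMatchRun cs (n + 1)

def validate_interface_name_alt (interface : String) : Bool :=
  pvMatchRun interface.toList 0

-- ===== PRECONDITION & SPEC =====
def Spec_validate_interface_name (interface : String) (out : Bool) : Prop := out = validate_interface_name_alt interface
instance (interface : String) (out : Bool) : Decidable (Spec_validate_interface_name interface out) := by unfold Spec_validate_interface_name; infer_instance

-- ===== CLAIM (what is proved, stated in full; the proofs are below) =====
def Claim_equal_validate_interface_name : Prop := ∀ (interface : String), Dom_validate_interface_name interface → Spec_validate_interface_name interface (validate_interface_name interface)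

-- ===== LEMMAS AND PROOFS =====

-- On domain characters, membership in A's allowed set coincides with B's character class.
set_option maxRecDepth 4096 in
theorem pv_char_eq (c : Char) (hc : pvDomChar c = true) :
    PySem.Set.contains pvAllowedChars c = pvIsClassChar c := by
  have h1 : c = Char.ofNat c.toNat := (Char.ofNat_toNat c).symm
  simp only [pvDomChar, Bool.or_eq_true, Bool.and_eq_true, decide_eq_true_eq, beq_iff_eq] at hc
  have h3 : c.toNat ≤ 126 := by omega
  rw [h1]
  interval_cases (c.toNat) <;> decide

-- The counter automaton computes: length check 1 ≤ n+|cs| ≤ 15 plus the class on every char.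
theorem pv_run_eq (cs : List Char) (n : Nat) (hn : n ≤ 15) :
    pvMatchRun cs n
      = (decide (1 ≤ n + cs.length) && decide (n + cs.length ≤ 15) && cs.all pvIsClassChar) := by
  induction cs generalizing n with
  | nil =>
      simp [pvMatchRun]
      omega
  | cons c cs ih =>
      by_cases h : n < 15
      · rw [show pvMatchRun (c :: cs) n
              = (decide (n < 15) && pvIsClassChar c && pvMatchRun cs (n + 1)) from rfl,
            ih (n + 1) (by omega)]
        simp only [List.length_cons, List.all_cons]
        have e : n + 1 + cs.length = n + (cs.length + 1) := by omega
        rw [e]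
        by_cases hcl : pvIsClassChar c = true <;> (simp [hcl, h]; try rfl)
      · have h15 : n = 15 := by omega
        subst h15
        rw [show pvMatchRun (c :: cs) 15
              = (decide (15 < 15) && pvIsClassChar c && pvMatchRun cs (15 + 1)) from rfl]
        simp

-- Under Dom, A's per-character test agrees with B's class on every character of the list.
theorem pv_all_eq (cs : List Char) (hd : cs.all pvDomChar = true) :
    cs.all (fun c => PySem.Set.contains pvAllowedChars c) = cs.all pvIsClassChar := by
  induction cs with
  | nil => simp
  | cons c cs ih =>
      simp only [List.all_cons, Bool.and_eq_true] at hd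
      simp only [List.all_cons, ih hd.2, pv_char_eq c hd.1]

-- ===== VERDICT (by name: the statement is the Claim_ definition above) =====
theorem validate_interface_name_spec : Claim_equal_validate_interface_name := by
  intro interface hdom
  unfold Spec_validate_interface_name validate_interface_name validate_interface_name_alt
  have hd : interface.toList.all pvDomChar = true := hdom
  rw [pv_run_eq interface.toList 0 (by omega), pv_all_eq interface.toList hd,
      PySem.Str.len_eq]
  generalize interface.toList = l
  rcases h : l.all pvIsClassChar with _ | _ <;>
    split_ifs with h1 h2 <;>
      simp_all
  all_goals first
    | omega
    | exact List.length_pos_of_ne_nil h1
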